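-- pv_equiv track=rewrite | github.com/Sayantan-coder/Python-Easy-Level-Practice | western_showdown.py | showdown
-- ===== SOURCE A (Python) =====
-- def showdown(word1: str, word2: str) -> str:
--     count = 0
--     count1 = 0
--     for i in range(0, len(word1)):
--         if word1[i] == " ":
--             count += 1
--         else:
--             break
--     for j in range(0, len(word2)):
--         if word2[j] == " ":
--             count1 += 1
--         else:
--             break
--     if count < count1:
--         return "word1"
--     elif count == count1:
--         return "tie"
--     else:
--         return "word2"
-- ===== SOURCE B (Python) =====
-- def showdown(word1: str, word2: str) -> str:
--     # Walk both strings in lockstep; the winner is decided at the first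
--     # position where exactly one string still has a leading space.
--     i = 0
--     while True:
--         a = i < len(word1) and word1[i] == ' '
--         b = i < len(word2) and word2[i] == ' '
--         if a and b:
--             i += 1
--         elif a:
--             return "word2"
--         elif b:
--             return "word1"
--         else:
--             return "tie"
-- ===== Notes on version B (the rewrite author's own statement) =====
-- stated objective: alternative
-- what changed: Replaces two independent count-then-compare scans with a single lockstep walk over both strings that never counts anything: it returns at the first index where exactly one string still has a leading space.
import Mathlib
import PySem

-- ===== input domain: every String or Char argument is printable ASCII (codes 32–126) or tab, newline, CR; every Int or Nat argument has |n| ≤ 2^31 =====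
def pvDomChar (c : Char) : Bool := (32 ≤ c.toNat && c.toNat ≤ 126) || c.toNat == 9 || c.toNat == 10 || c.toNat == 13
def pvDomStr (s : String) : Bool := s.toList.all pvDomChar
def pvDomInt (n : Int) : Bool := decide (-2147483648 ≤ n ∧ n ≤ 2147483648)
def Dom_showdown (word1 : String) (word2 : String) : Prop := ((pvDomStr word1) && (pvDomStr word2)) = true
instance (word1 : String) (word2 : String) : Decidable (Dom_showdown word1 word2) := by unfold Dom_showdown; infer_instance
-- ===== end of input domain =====

-- B replaces A's two count-then-compare scans with one lockstep walk over both
-- strings that never counts: it decides at the first index where exactly one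
-- string still has a leading space (alternative decomposition, same cost).

-- ===== PORT A =====
-- the for-loop with break: scan chars, count spaces, stop at first non-space
def showdownLoopA : List Char → Int → Int
  | [], count => count
  | ch :: rest, count => if ch == ' ' then showdownLoopA rest (count + 1) else count

def showdown (word1 : String) (word2 : String) : String :=
  let count := showdownLoopA word1.toList 0
  let count1 := showdownLoopA word2.toList 0
  if count < count1 then "word1"
  else if count = count1 then "tie"
  else "word2"

-- ===== PORT B =====
-- the while-loop walking both strings in lockstep (index i becomes structural
-- recursion on both char lists; a = "word1 still has a space at i", b = same for word2)
def showdownWalk : List Char → List Char → String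
  | c1 :: r1, c2 :: r2 =>
    if c1 == ' ' && c2 == ' ' then showdownWalk r1 r2
    else if c1 == ' ' then "word2"
    else if c2 == ' ' then "word1"
    else "tie"
  | c1 :: _, [] => if c1 == ' ' then "word2" else "tie"
  | [], c2 :: _ => if c2 == ' ' then "word1" else "tie"
  | [], [] => "tie"

def showdown_alt (word1 : String) (word2 : String) : String :=
  showdownWalk word1.toList word2.toList

-- ===== PRECONDITION & SPEC =====
def Spec_showdown (word1 : String) (word2 : String) (out : String) : Prop := out = showdown_alt word1 word2
instance (word1 : String) (word2 : String) (out : String) : Decidable (Spec_showdown word1 word2 out) := by unfold Spec_showdown; infer_instance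

-- ===== CLAIM =====
def Claim_equal_showdown : Prop := ∀ (word1 : String) (word2 : String), Dom_showdown word1 word2 → Spec_showdown word1 word2 (showdown word1 word2)

-- ===== LEMMAS AND PROOFS =====
theorem showdownLoopA_eq (l : List Char) (c : Int) :
    showdownLoopA l c = c + ((l.takeWhile (· == ' ')).length : Int) := by
  induction l generalizing c with
  | nil => simp [showdownLoopA]
  | cons ch rest ih =>
    by_cases h : ch == ' '
    · simp [showdownLoopA, h, List.takeWhile, ih]; ring
    · simp [showdownLoopA, h, List.takeWhile]

theorem showdownWalk_eq (l1 l2 : List Char) :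
    showdownWalk l1 l2 =
      (if ((l1.takeWhile (· == ' ')).length : Int) < ((l2.takeWhile (· == ' ')).length : Int) then "word1"
       else if ((l1.takeWhile (· == ' ')).length : Int) = ((l2.takeWhile (· == ' ')).length : Int) then "tie"
       else "word2") := by
  induction l1 generalizing l2 with
  | nil =>
    cases l2 with
    | nil => simp [showdownWalk]
    | cons c2 r2 =>
      by_cases h2 : c2 == ' ' <;>
        simp [showdownWalk, h2, List.takeWhile] <;> split_ifs <;> first | rfl | omega
  | cons c1 r1 ih =>
    cases l2 with
    | nil =>
      by_cases h1 : c1 == ' ' <;>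
        simp [showdownWalk, h1, List.takeWhile] <;> split_ifs <;> first | rfl | omega
    | cons c2 r2 =>
      by_cases h1 : c1 == ' ' <;> by_cases h2 : c2 == ' ' <;>
        simp [showdownWalk, h1, h2, List.takeWhile, ih] <;> split_ifs <;> first | rfl | omega

-- ===== VERDICT =====
theorem showdown_spec : Claim_equal_showdown := by
  intro word1 word2 _
  unfold Spec_showdown showdown showdown_alt
  rw [showdownLoopA_eq, showdownLoopA_eq, showdownWalk_eq]
  simp
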